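-- pv_equiv track=rewrite | github.com/forrestdavis/GardenPath | data.py | find_def_target
-- ===== SOURCE A (Python) =====
-- def find_def_target(t_words, sent):
--
--     sent = sent.split(' ')
--     count = 0
--     t_idxs = []
--     for x in range(len(sent)):
--         word = sent[x]
--         if count > len(t_words)-1:
--             break
--         if word == t_words[count]:
--             count += 1
--             t_idxs.append(x)
--
--     return t_idxs
-- ===== SOURCE B (Python) =====
-- def find_def_target(t_words, sent):
--     # Pass 1: build an inverted index word -> ordered list of positions.
--     occ = {}
--     for i, w in enumerate(sent.split(' ')):
--         occ[w] = occ.get(w, []) + [i]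
--     # Pass 2: for each target, take its first occurrence at or after pos.
--     t_idxs = []
--     pos = 0
--     for w in t_words:
--         nxt = None
--         for i in occ.get(w, []):
--             if i >= pos:
--                 nxt = i
--                 break
--         if nxt is None:
--             break
--         t_idxs.append(nxt)
--         pos = nxt + 1
--     return t_idxs
-- ===== Notes on version B (the rewrite author's own statement) =====
-- stated objective: alternative
-- what changed: B first builds an inverted index (dict word -> ordered list of positions) over the split sentence, then walks the target words consuming from each word's occurrence list the first position at or after the previous match, instead of A's single positional scan with a running target counter.
import Mathlib
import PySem

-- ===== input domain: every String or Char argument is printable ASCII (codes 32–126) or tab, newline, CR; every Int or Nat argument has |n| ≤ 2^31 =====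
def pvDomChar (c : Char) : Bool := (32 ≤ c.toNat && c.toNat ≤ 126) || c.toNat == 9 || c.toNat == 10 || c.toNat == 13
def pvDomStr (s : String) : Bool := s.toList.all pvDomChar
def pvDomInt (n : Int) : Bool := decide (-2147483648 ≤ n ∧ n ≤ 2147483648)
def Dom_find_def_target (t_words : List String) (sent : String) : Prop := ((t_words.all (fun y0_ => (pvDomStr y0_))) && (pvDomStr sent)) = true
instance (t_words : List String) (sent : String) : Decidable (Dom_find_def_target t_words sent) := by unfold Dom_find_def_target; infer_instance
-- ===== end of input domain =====

-- B builds an inverted index (word -> ordered occurrence positions) and consumes it target-by-target, instead of A's single positional scan with a target counter (alternative decomposition, same cost).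


-- ===== PORT A =====
-- A's for-loop over sentence positions x, with the running target counter `count`,
-- the break when count exceeds len(t_words)-1, and the accumulated t_idxs.
def findLoopA (ws : List String) (t : List String) (count : Nat) (x : Nat) (acc : List Int) : List Int :=
  match ws with
  | [] => acc
  | w :: rest =>
    if t.length ≤ count then acc          -- count > len(t_words)-1 → break
    else if w = t.getD count "" then      -- t_words[count], in range here
      findLoopA rest t (count + 1) (x + 1) (acc ++ [(x : Int)])
    else
      findLoopA rest t count (x + 1) acc

def find_def_target (t_words : List String) (sent : String) : List Int :=
  findLoopA ((PySem.Str.split? sent " ").getD []) t_words 0 0 []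

-- ===== PORT B =====
-- Pass 1: occ[w] = occ.get(w, []) + [i] over enumerate(words)  (the inverted index)
def buildOcc (words : List String) : PySem.Dict String (List Int) :=
  (PySem.List.enumerate words 0).foldl
    (fun d p => d.modify p.2 [] (fun l => l ++ [p.1])) PySem.Dict.empty

-- the inner for-loop over occ.get(w, []): first position i with i >= pos (break), else None
def firstGE (xs : List Int) (pos : Int) : Option Int :=
  match xs with
  | [] => none
  | x :: rest => if pos ≤ x then some x else firstGE rest pos

-- Pass 2: the for-loop over the target words with the running position pos (break on None)
def findLoopB (occ : PySem.Dict String (List Int)) (ts : List String) (pos : Int) : List Int :=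
  match ts with
  | [] => []
  | w :: rest =>
    match firstGE (occ.getD w []) pos with
    | none => []
    | some i => i :: findLoopB occ rest (i + 1)

def find_def_target_alt (t_words : List String) (sent : String) : List Int :=
  findLoopB (buildOcc ((PySem.Str.split? sent " ").getD [])) t_words 0

-- ===== PRECONDITION & SPEC =====
def Spec_find_def_target (t_words : List String) (sent : String) (out : List Int) : Prop := out = find_def_target_alt t_words sent
instance (t_words : List String) (sent : String) (out : List Int) : Decidable (Spec_find_def_target t_words sent out) := by unfold Spec_find_def_target; infer_instance

-- ===== CLAIM (what is proved, stated in full; the proofs are below) =====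
def Claim_equal_find_def_target : Prop := ∀ (t_words : List String) (sent : String), Dom_find_def_target t_words sent → Spec_find_def_target t_words sent (find_def_target t_words sent)

-- ===== LEMMAS AND PROOFS =====

-- first index i ≥ x with words[i] = w, scanning words labeled from x (reference form)
def indexFromB (ws : List String) (i : Nat) (w : String) : Option Nat :=
  match ws with
  | [] => none
  | v :: rest => if v = w then some i else indexFromB rest (i + 1) w

-- common intermediate: the greedy match phrased on the current word SUFFIX (ws = words.drop x)
def goS (ws : List String) (ts : List String) (x : Nat) : List Int :=
  match ts with
  | [] => []
  | w :: rest =>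
    match indexFromB ws x w with
    | none => []
    | some i => (i : Int) :: goS (ws.drop (i + 1 - x)) rest (i + 1)

theorem indexFromB_ge {ws : List String} {x : Nat} {w : String} {i : Nat}
    (h : indexFromB ws x w = some i) : x ≤ i := by
  induction ws generalizing x with
  | nil => simp [indexFromB] at h
  | cons v rest ih =>
    simp only [indexFromB] at h
    split at h
    · cases h; exact le_refl _
    · exact Nat.le_of_succ_le (ih h)

theorem loopA_eq_goS (ws : List String) (t : List String) (count x : Nat) (acc : List Int) :
    findLoopA ws t count x acc = acc ++ goS ws (t.drop count) x := by
  induction ws generalizing count x acc with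
  | nil =>
    cases h : t.drop count with
    | nil => simp [findLoopA, goS]
    | cons w rest => simp [findLoopA, goS, indexFromB]
  | cons v restw ih =>
    by_cases hc : t.length ≤ count
    · have ht : t.drop count = [] := List.drop_eq_nil_of_le hc
      simp [findLoopA, goS, hc, ht]
    · have hc' : count < t.length := Nat.lt_of_not_le hc
      have hdrop : t.drop count = t.getD count "" :: t.drop (count + 1) := by
        rw [List.getD_eq_getElem t "" hc']
        exact List.drop_eq_getElem_cons hc'
      by_cases hw : v = t.getD count ""
      · rw [findLoopA]
        simp only [if_neg hc, if_pos hw]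
        rw [ih, hdrop, goS]
        have hidx : indexFromB (v :: restw) x (t.getD count "") = some x := by
          simp [indexFromB, hw]
        simp only [hidx]
        have hx : x + 1 - x = 1 := by omega
        simp [hx, List.append_assoc]
      · rw [findLoopA]
        simp only [if_neg hc, if_neg hw]
        rw [ih, hdrop]
        congr 1
        rw [goS, goS]
        have hstep : indexFromB (v :: restw) x (t.getD count "") =
            indexFromB restw (x + 1) (t.getD count "") := by
          simp only [indexFromB]; rw [if_neg hw]
        rw [hstep]
        cases h : indexFromB restw (x + 1) (t.getD count "") with
        | none => rfl
        | some i =>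
          have hge : x + 1 ≤ i := indexFromB_ge h
          simp only
          have h1 : i + 1 - x = (i + 1 - (x + 1)) + 1 := by omega
          rw [h1, List.drop_succ_cons]

-- the occurrence list of w in words labeled from s (what the inverted index stores)
def occList (words : List String) (s : Int) (w : String) : List Int :=
  ((PySem.List.enumerate words s).filter (fun p => p.2 == w)).map (fun p => p.1)

theorem buildOcc_getD (words : List String) (w : String) :
    (buildOcc words).getD w [] = occList words 0 w := by
  unfold buildOcc occList
  have hfold : (PySem.List.enumerate words 0).foldl
      (fun d p => d.modify p.2 [] (fun l => l ++ [p.1])) PySem.Dict.empty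
      = ((PySem.List.enumerate words 0).map (fun p => (p.2, p.1))).foldl
          (fun d p => d.modify p.1 [] (fun l => l ++ [p.2])) PySem.Dict.empty := by
    rw [List.foldl_map]
  rw [hfold, PySem.Dict.getD_foldl_modify_append]
  simp [List.filter_map, List.map_map, Function.comp_def, PySem.Dict.getD_empty]

-- firstGE on an occurrence list labeled from s finds the first match at label ≥ pos
def idxGE (words : List String) (s : Nat) (pos : Nat) (w : String) : Option Nat :=
  match words with
  | [] => none
  | v :: rest => if v = w ∧ pos ≤ s then some s else idxGE rest (s + 1) pos w

theorem firstGE_occList (words : List String) (s pos : Nat) (w : String) :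
    firstGE (occList words (s : Int) w) (pos : Int)
      = (idxGE words s pos w).map (fun n => (n : Int)) := by
  induction words generalizing s with
  | nil => simp [occList, firstGE, idxGE, PySem.List.enumerate]
  | cons v rest ih =>
    have he : PySem.List.enumerate (v :: rest) (s : Int)
        = ((s : Int), v) :: PySem.List.enumerate rest ((s : Int) + 1) := by
      simp [PySem.List.enumerate_cons]
    have hcast : ((s : Int) + 1) = ((s + 1 : Nat) : Int) := by push_cast; ring
    by_cases hv : v = w
    · have hocc : occList (v :: rest) (s : Int) w
          = (s : Int) :: occList rest ((s + 1 : Nat) : Int) w := by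
        rw [occList, he, hcast]
        simp [occList, hv]
      rw [hocc]
      simp only [firstGE, idxGE]
      by_cases hp : pos ≤ s
      · rw [if_pos (Nat.cast_le.mpr hp), if_pos ⟨hv, hp⟩]
        rfl
      · rw [if_neg (by exact_mod_cast hp : ¬ ((pos : Int) ≤ (s : Int))),
          if_neg (by tauto : ¬ (v = w ∧ pos ≤ s)), ih (s + 1)]
    · have hocc : occList (v :: rest) (s : Int) w = occList rest ((s + 1 : Nat) : Int) w := by
        rw [occList, he, hcast]
        simp [occList, hv]
      rw [hocc]
      simp only [idxGE]
      rw [if_neg (by tauto : ¬ (v = w ∧ pos ≤ s)), ih (s + 1)]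

theorem idxGE_past (words : List String) (s pos : Nat) (w : String) (h : pos ≤ s) :
    idxGE words s pos w = indexFromB words s w := by
  induction words generalizing s with
  | nil => rfl
  | cons v rest ih =>
    rw [idxGE, indexFromB]
    by_cases hv : v = w
    · simp [hv, h]
    · simp [hv, ih (s + 1) (by omega)]

theorem idxGE_drop (words : List String) (s pos : Nat) (w : String) (h : s ≤ pos) :
    idxGE words s pos w = indexFromB (words.drop (pos - s)) pos w := by
  induction words generalizing s with
  | nil => simp [idxGE, indexFromB]
  | cons v rest ih =>
    by_cases he : s = pos
    · subst he
      simp only [Nat.sub_self, List.drop_zero]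
      exact idxGE_past _ _ _ _ (le_refl _)
    · have hlt : s < pos := by omega
      have h1 : pos - s = (pos - (s + 1)) + 1 := by omega
      rw [idxGE, if_neg (fun hc => absurd hc.2 (by omega)), ih (s + 1) (by omega),
        h1, List.drop_succ_cons]

theorem loopB_eq_goS (words : List String) (ts : List String) (pos : Nat) :
    findLoopB (buildOcc words) ts (pos : Int) = goS (words.drop pos) ts pos := by
  induction ts generalizing pos with
  | nil => simp [findLoopB, goS]
  | cons w rest ih =>
    have key : firstGE ((buildOcc words).getD w []) (pos : Int)
        = (indexFromB (words.drop pos) pos w).map (fun n => (n : Int)) := by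
      rw [buildOcc_getD]
      have h0 : (0 : Int) = ((0 : Nat) : Int) := rfl
      rw [h0, firstGE_occList words 0 pos w, idxGE_drop words 0 pos w (Nat.zero_le _),
        Nat.sub_zero]
    simp only [findLoopB, goS, key]
    cases h : indexFromB (words.drop pos) pos w with
    | none => rfl
    | some i =>
      have hge : pos ≤ i := indexFromB_ge h
      simp only [Option.bind_eq_bind, Option.bind_some, Option.pure_def, Option.map_some]
      have hcast : (i : Int) + 1 = ((i + 1 : Nat) : Int) := by push_cast; ring
      rw [hcast, ih (i + 1), List.drop_drop]
      have hsum : pos + (i + 1 - pos) = i + 1 := by omega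
      rw [hsum]

-- ===== VERDICT (by name: the statement is the Claim_ definition above) =====
theorem find_def_target_spec : Claim_equal_find_def_target := by
  intro t_words sent _
  unfold Spec_find_def_target find_def_target find_def_target_alt
  rw [loopA_eq_goS]
  have := loopB_eq_goS ((PySem.Str.split? sent " ").getD []) t_words 0
  simp at this ⊢
  rw [this]
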